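-- pv_equiv track=rewrite | github.com/Gajabgamer/BRAMHA-DEV | backend/bugpredictor_api/analysis.py | highest_risk_from_issues
-- ===== SOURCE A (Python) =====
-- from typing import Any
--
-- def highest_risk_from_issues(issues: list[dict[str, Any]]) -> str:
--     if any(item["severity"] == "high" for item in issues):
--         return "high"
--     if any(item["severity"] == "medium" for item in issues):
--         return "medium"
--     if any(item["severity"] == "low" for item in issues):
--         return "low"
--     return "none"
-- ===== SOURCE B (Python) =====
-- def highest_risk_from_issues(issues):
--     saw_medium = False
--     saw_low = False
--     for item in issues:
--         s = item["severity"]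
--         if s == "high":
--             return "high"
--         if s == "medium":
--             saw_medium = True
--         elif s == "low":
--             saw_low = True
--     if saw_medium:
--         return "medium"
--     if saw_low:
--         return "low"
--     return "none"
-- ===== Notes on version B (the rewrite author's own statement) =====
-- stated objective: alternative
-- what changed: Replaces A's three separate short-circuiting any()-passes over the issue list with a single loop that returns "high" immediately and otherwise records saw_medium/saw_low flags, deciding the result after one traversal.
import Mathlib
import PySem

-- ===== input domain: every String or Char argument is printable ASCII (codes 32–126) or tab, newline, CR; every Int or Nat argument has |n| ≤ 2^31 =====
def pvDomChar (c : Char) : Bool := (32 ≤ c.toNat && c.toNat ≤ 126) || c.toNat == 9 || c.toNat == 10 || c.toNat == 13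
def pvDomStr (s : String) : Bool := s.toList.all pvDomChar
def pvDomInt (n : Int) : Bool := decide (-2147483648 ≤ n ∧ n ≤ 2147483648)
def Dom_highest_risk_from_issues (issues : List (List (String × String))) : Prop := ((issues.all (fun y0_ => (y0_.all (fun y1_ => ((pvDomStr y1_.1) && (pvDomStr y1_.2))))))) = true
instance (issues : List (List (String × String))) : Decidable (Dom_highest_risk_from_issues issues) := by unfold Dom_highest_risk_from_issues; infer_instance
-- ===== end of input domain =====

-- ===== PORT A =====
-- B replaces A's three any()-passes with a single early-returning loop carrying two flags (same value, one traversal).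
-- Python dict lookup item["severity"] on the association-list convention: first pair with that key (none = KeyError).
def pvSev? (item : List (String × String)) : Option String :=
  (item.find? (fun p => p.1 == "severity")).map (·.2)

-- literal port of A: three short-circuit any-passes, then "none"
def highest_risk_from_issues (issues : List (List (String × String))) : String :=
  if issues.any (fun item => pvSev? item == some "high") then "high"
  else if issues.any (fun item => pvSev? item == some "medium") then "medium"
  else if issues.any (fun item => pvSev? item == some "low") then "low"
  else "none"

-- ===== PORT B =====
-- port of B's single loop: early return on "high", otherwise accumulate sawMedium/sawLow
def pvAltLoop (rest : List (List (String × String))) (sawMedium sawLow : Bool) : String :=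
  match rest with
  | [] => if sawMedium then "medium" else if sawLow then "low" else "none"
  | item :: rest =>
      let s := pvSev? item
      if s == some "high" then "high"
      else pvAltLoop rest (sawMedium || (s == some "medium")) (sawLow || (s == some "low"))

def highest_risk_from_issues_alt (issues : List (List (String × String))) : String :=
  pvAltLoop issues false false

-- ===== PRECONDITION & SPEC =====
-- Pre_ excludes exactly the inputs on which Python A raises KeyError: some issue lacks a
-- "severity" key and no earlier issue has severity "high" (A's first any()-pass reads every
-- item up to and including the first "high"; with no "high" before it, a keyless item raises).
def Pre_highest_risk_from_issues (issues : List (List (String × String))) : Prop :=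
  ∀ i < issues.length, pvSev? (issues.getD i []) = none →
    ∃ j < i, pvSev? (issues.getD j []) = some "high"
instance (issues : List (List (String × String))) : Decidable (Pre_highest_risk_from_issues issues) := by
  unfold Pre_highest_risk_from_issues; infer_instance
def pvWitness_highest_risk_from_issues : (List (List (String × String))) :=
  [[("severity", "low")], [("severity", "high")], [("note", "x")]]
def Spec_highest_risk_from_issues (issues : List (List (String × String))) (out : String) : Prop := out = highest_risk_from_issues_alt issues
instance (issues : List (List (String × String))) (out : String) : Decidable (Spec_highest_risk_from_issues issues out) := by unfold Spec_highest_risk_from_issues; infer_instance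

-- ===== CLAIM (what is proved, stated in full; the proofs are below) =====
def Claim_equal_highest_risk_from_issues : Prop := ∀ (issues : List (List (String × String))), Dom_highest_risk_from_issues issues → Pre_highest_risk_from_issues issues → Spec_highest_risk_from_issues issues (highest_risk_from_issues issues)

-- ===== LEMMAS AND PROOFS =====
-- characterisation of B's loop in terms of the three membership tests A performs
lemma pvAltLoop_eq (issues : List (List (String × String))) (sawMedium sawLow : Bool) :
    pvAltLoop issues sawMedium sawLow =
      if issues.any (fun item => pvSev? item == some "high") then "high"
      else if sawMedium || issues.any (fun item => pvSev? item == some "medium") then "medium"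
      else if sawLow || issues.any (fun item => pvSev? item == some "low") then "low"
      else "none" := by
  induction issues generalizing sawMedium sawLow with
  | nil => simp [pvAltLoop]
  | cons item rest ih =>
      simp only [pvAltLoop, List.any_cons]
      by_cases h : pvSev? item == some "high"
      · simp [h]
      · rw [if_neg (by simp [h]), ih]
        by_cases hh : rest.any (fun item => pvSev? item == some "high")
        · simp [h, hh]
        · by_cases hm : pvSev? item == some "medium" <;>
          by_cases hl : pvSev? item == some "low" <;>
            simp [h, hh, hm, hl, Bool.or_comm]

-- ===== VERDICT (by name: the statement is the Claim_ definition above) =====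
theorem highest_risk_from_issues_spec : Claim_equal_highest_risk_from_issues := by
  intro issues _ _
  unfold Spec_highest_risk_from_issues highest_risk_from_issues highest_risk_from_issues_alt
  rw [pvAltLoop_eq]
  simp
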